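-- pv_equiv track=rewrite | github.com/goncalomb/advent-of-code | 2025/4/main.py | find_accessible_rolls
-- ===== SOURCE A (Python) =====
-- def find_accessible_rolls(data: list[list[bool]], k=1, n=4):
--     w = len(data[0])
--     h = len(data)
--
--     def test(x, y):
--         c = 0
--         rx = max(0, x - k), min(w, x + k + 1)
--         ry = max(0, y - k), min(h, y + k + 1)
--         for xx in range(*rx):
--             for yy in range(*ry):
--                 if data[xx][yy] and (xx != x or yy != y):
--                     c += 1
--                     if c >= n:
--                         return False
--         return True
--
--     for x in range(0, w):
--         for y in range(0, h):
--             if data[x][y] and test(x, y):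
--                 yield x, y
-- ===== SOURCE B (Python) =====
-- def find_accessible_rolls(data: list[list[bool]], k=1, n=4):
--     # Row prefix-sum counts: each window count is a sum over rows of two
--     # prefix-table lookups, removing the inner per-column scan of A.
--     w = len(data[0])
--     h = len(data)
--     pref = []
--     for x in range(w):
--         row = data[x]
--         acc = [0]
--         for y in range(h):
--             acc.append(acc[-1] + (1 if row[y] else 0))
--         pref.append(acc)
--     self_cnt = 1 if k >= 0 else 0
--     for x in range(w):
--         x0, x1 = max(0, x - k), min(w, x + k + 1)
--         for y in range(h):
--             if data[x][y]:
--                 y0, y1 = max(0, y - k), min(h, y + k + 1)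
--                 c = sum(pref[xx][y1] - pref[xx][y0] for xx in range(x0, x1)) - self_cnt
--                 if c < n:
--                     yield x, y
-- ===== Notes on version B (the rewrite author's own statement) =====
-- stated objective: faster
-- what changed: A rescans the whole (2k+1)x(2k+1) window cell by cell for every true cell; B precomputes per-row prefix-sum tables once and counts each window as a sum over rows of two table lookups, eliminating the inner per-column scan.
-- intended difference: For n <= 0 when the grid has an isolated true cell (no other true cell in its k-window), A still yields every such isolated cell because its early-exit counter only fires after a first neighbour, although no cell has fewer than n <= 0 true neighbours; B yields nothing there, which is the intended meaning of the threshold. — e.g. on find_accessible_rolls([[true]], 1, 0): A returns [(0, 0)], B returns []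
import Mathlib
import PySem

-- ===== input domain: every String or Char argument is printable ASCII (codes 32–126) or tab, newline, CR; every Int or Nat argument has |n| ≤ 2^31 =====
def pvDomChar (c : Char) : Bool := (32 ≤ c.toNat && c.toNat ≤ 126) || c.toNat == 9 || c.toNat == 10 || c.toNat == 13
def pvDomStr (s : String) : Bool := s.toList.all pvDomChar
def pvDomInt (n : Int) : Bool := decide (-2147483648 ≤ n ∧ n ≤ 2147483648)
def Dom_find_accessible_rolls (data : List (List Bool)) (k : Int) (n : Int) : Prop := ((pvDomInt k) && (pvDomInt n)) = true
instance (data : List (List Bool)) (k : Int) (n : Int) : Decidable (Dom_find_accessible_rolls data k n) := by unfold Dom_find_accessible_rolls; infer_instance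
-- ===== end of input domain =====

-- B replaces A's per-cell window scan by per-row prefix sums, counting each window
-- with two table lookups per row (measured faster); the listed generator output is
-- proved equal outside D_ (n ≤ 0 with an isolated true cell, where A wrongly yields).

-- ===== PORT A =====
-- data[xx][yy]; indices are in range under Pre_ (pyGetD defaults are never the value)
def pvA_cell (data : List (List Bool)) (xx yy : Int) : Bool :=
  PySem.List.pyGetD (PySem.List.pyGetD data xx []) yy false

-- the inner 'for yy in range(*ry)' of test: some c' = fall through with counter c', none = 'return False'
def pvA_testInner (data : List (List Bool)) (n x y xx : Int) : List Int → Int → Option Int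
  | [], c => some c
  | yy :: t, c =>
    if pvA_cell data xx yy && !(xx == x && yy == y) then
      if c + 1 ≥ n then none
      else pvA_testInner data n x y xx t (c + 1)
    else pvA_testInner data n x y xx t c

-- the outer 'for xx in range(*rx)' of test
def pvA_testOuter (data : List (List Bool)) (k n h x y : Int) : List Int → Int → Option Int
  | [], c => some c
  | xx :: t, c =>
    match pvA_testInner data n x y xx
        (PySem.List.pyRange (max 0 (y - k)) (min h (y + k + 1)) 1) c with
    | none => none
    | some c' => pvA_testOuter data k n h x y t c'

def pvA_test (data : List (List Bool)) (k n w h x y : Int) : Bool :=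
  (pvA_testOuter data k n h x y
    (PySem.List.pyRange (max 0 (x - k)) (min w (x + k + 1)) 1) 0).isSome

def find_accessible_rolls (data : List (List Bool)) (k : Int) (n : Int) : List (Int × Int) :=
  let w : Int := ((data.headD []).length : Int)   -- len(data[0]); Pre_ gives data ≠ []
  let h : Int := (data.length : Int)
  (PySem.List.pyRange 0 w 1).foldl (fun acc x =>
    (PySem.List.pyRange 0 h 1).foldl (fun acc y =>
      if pvA_cell data x y && pvA_test data k n w h x y then acc ++ [(x, y)] else acc) acc) []

-- ===== PORT B =====
def pvB_cell (data : List (List Bool)) (xx yy : Int) : Bool :=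
  PySem.List.pyGetD (PySem.List.pyGetD data xx []) yy false

-- one row of the prefix table: acc = [0]; for y in range(h): acc.append(acc[-1] + v)
def pvB_prefRow (data : List (List Bool)) (h x : Int) : List Int :=
  let row := PySem.List.pyGetD data x []
  (PySem.List.pyRange 0 h 1).foldl
    (fun acc y =>
      acc ++ [PySem.List.pyGetD acc (-1) 0 +
              (if PySem.List.pyGetD row y false then (1 : Int) else 0)]) [0]

def find_accessible_rolls_alt (data : List (List Bool)) (k : Int) (n : Int) : List (Int × Int) :=
  let w : Int := ((data.headD []).length : Int)
  let h : Int := (data.length : Int)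
  let pref : List (List Int) := (PySem.List.pyRange 0 w 1).map (fun x => pvB_prefRow data h x)
  let selfCnt : Int := if k ≥ 0 then 1 else 0
  (PySem.List.pyRange 0 w 1).foldl (fun acc x =>
    let x0 := max 0 (x - k)
    let x1 := min w (x + k + 1)
    (PySem.List.pyRange 0 h 1).foldl (fun acc y =>
      if pvB_cell data x y then
        let y0 := max 0 (y - k)
        let y1 := min h (y + k + 1)
        let c : Int :=
          ((PySem.List.pyRange x0 x1 1).foldl (fun s xx =>
            s + (PySem.List.pyGetD (PySem.List.pyGetD pref xx []) y1 0 -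
                 PySem.List.pyGetD (PySem.List.pyGetD pref xx []) y0 0)) 0) - selfCnt
        if c < n then acc ++ [(x, y)] else acc
      else acc) acc) []

-- ===== PRECONDITION & SPEC =====
-- Pre_ excludes exactly the inputs on which A raises IndexError: the empty grid (data[0])
-- and grids where the transposed indexing data[x][y], x < len(data[0]), y < len(data), goes
-- out of range (it needs len(data) >= len(data[0]) and each of the first len(data[0]) rows
-- of length >= len(data)).
def Pre_find_accessible_rolls (data : List (List Bool)) (k : Int) (n : Int) : Prop :=
  data ≠ [] ∧ (data.headD []).length ≤ data.length ∧
    ∀ row ∈ data.take (data.headD []).length, data.length ≤ row.length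
instance (data : List (List Bool)) (k : Int) (n : Int) : Decidable (Pre_find_accessible_rolls data k n) := by unfold Pre_find_accessible_rolls; infer_instance

def pvWitness_find_accessible_rolls : List (List Bool) × Int × Int :=
  ([[true, false], [true, true]], 1, 4)

-- D_-side cell accessor (independent of both ports)
def pvD_cell (data : List (List Bool)) (x y : Nat) : Bool := (data.getD x []).getD y false

-- (x, y) is a true cell with no other true cell in its k-window
def pvD_isolated (data : List (List Bool)) (k : Int) (x y : Nat) : Prop :=
  pvD_cell data x y = true ∧
  ∀ xx ∈ List.range (data.headD []).length, ∀ yy ∈ List.range data.length,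
    ((x : Int) - k ≤ (xx : Int) ∧ (xx : Int) ≤ (x : Int) + k ∧
     (y : Int) - k ≤ (yy : Int) ∧ (yy : Int) ≤ (y : Int) + k ∧ ¬(xx = x ∧ yy = y)) →
    pvD_cell data xx yy = false

-- On n ≤ 0 with some isolated true cell, A still yields every isolated true cell (its
-- early-exit counter can only fail after a first neighbour), although no cell has fewer
-- than n ≤ 0 neighbours; B yields nothing there, the intended value.
def D_find_accessible_rolls (data : List (List Bool)) (k : Int) (n : Int) : Prop :=
  n ≤ 0 ∧ ∃ x ∈ List.range (data.headD []).length, ∃ y ∈ List.range data.length,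
    pvD_isolated data k x y
instance (data : List (List Bool)) (k : Int) (n : Int) : Decidable (D_find_accessible_rolls data k n) := by unfold D_find_accessible_rolls pvD_isolated; infer_instance

def Spec_find_accessible_rolls (data : List (List Bool)) (k : Int) (n : Int) (out : List (Int × Int)) : Prop := ¬ D_find_accessible_rolls data k n → out = find_accessible_rolls_alt data k n
instance (data : List (List Bool)) (k : Int) (n : Int) (out : List (Int × Int)) : Decidable (Spec_find_accessible_rolls data k n out) := by unfold Spec_find_accessible_rolls; infer_instance

def pvDiffWitness_find_accessible_rolls : List (List Bool) × Int × Int := ([[true]], 1, 0)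
def pvDiffWitnessOut_find_accessible_rolls : (List (Int × Int)) × (List (Int × Int)) := ([(0, 0)], [])

-- ===== CLAIM (what is proved, stated in full; the proofs are below) =====
def Claim_unchanged_find_accessible_rolls : Prop := ∀ (data : List (List Bool)) (k : Int) (n : Int), Dom_find_accessible_rolls data k n → Pre_find_accessible_rolls data k n → Spec_find_accessible_rolls data k n (find_accessible_rolls data k n)
def Claim_changed_find_accessible_rolls : Prop := Dom_find_accessible_rolls (pvDiffWitness_find_accessible_rolls.1) (pvDiffWitness_find_accessible_rolls.2.1) (pvDiffWitness_find_accessible_rolls.2.2) ∧ Pre_find_accessible_rolls (pvDiffWitness_find_accessible_rolls.1) (pvDiffWitness_find_accessible_rolls.2.1) (pvDiffWitness_find_accessible_rolls.2.2) ∧ D_find_accessible_rolls (pvDiffWitness_find_accessible_rolls.1) (pvDiffWitness_find_accessible_rolls.2.1) (pvDiffWitness_find_accessible_rolls.2.2) ∧ find_accessible_rolls (pvDiffWitness_find_accessible_rolls.1) (pvDiffWitness_find_accessible_rolls.2.1) (pvDiffWitness_find_accessible_rolls.2.2) = pvDiffWitnessOut_find_accessible_rolls.1 ∧ find_accessible_rolls_alt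 (pvDiffWitness_find_accessible_rolls.1) (pvDiffWitness_find_accessible_rolls.2.1) (pvDiffWitness_find_accessible_rolls.2.2) = pvDiffWitnessOut_find_accessible_rolls.2 ∧ pvDiffWitnessOut_find_accessible_rolls.1 ≠ pvDiffWitnessOut_find_accessible_rolls.2
def Claim_exact_find_accessible_rolls : Prop := ∀ (data : List (List Bool)) (k : Int) (n : Int), Dom_find_accessible_rolls data k n → Pre_find_accessible_rolls data k n → D_find_accessible_rolls data k n → find_accessible_rolls data k n ≠ find_accessible_rolls_alt data k n

-- ===== LEMMAS AND PROOFS =====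

-- indicator of a counted neighbour of (x,y)
def pvInd (data : List (List Bool)) (x y xx yy : Int) : Int :=
  if pvA_cell data xx yy && !(xx == x && yy == y) then 1 else 0

def pvRowCnt (data : List (List Bool)) (k h x y xx : Int) : Int :=
  ((PySem.List.pyRange (max 0 (y - k)) (min h (y + k + 1)) 1).map (pvInd data x y xx)).sum

def pvCnt (data : List (List Bool)) (k w h x y : Int) : Int :=
  ((PySem.List.pyRange (max 0 (x - k)) (min w (x + k + 1)) 1).map (pvRowCnt data k h x y)).sum

-- column prefix count of row x: trues among data[x][0..j)
def pvP (data : List (List Bool)) (x j : Int) : Int :=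
  ((PySem.List.pyRange 0 j 1).map (fun yy => if pvA_cell data x yy then (1 : Int) else 0)).sum

theorem pvInd_nonneg (data : List (List Bool)) (x y xx yy : Int) : 0 ≤ pvInd data x y xx yy := by
  unfold pvInd; split <;> omega

theorem pvSum_ind_nonneg (data : List (List Bool)) (x y xx : Int) (l : List Int) :
    0 ≤ (l.map (pvInd data x y xx)).sum := by
  apply List.sum_nonneg; intro a ha
  rcases List.mem_map.1 ha with ⟨b, _, rfl⟩; exact pvInd_nonneg _ _ _ _ _

theorem pvRowCnt_nonneg (data : List (List Bool)) (k h x y xx : Int) :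
    0 ≤ pvRowCnt data k h x y xx := pvSum_ind_nonneg _ _ _ _ _

theorem pvA_testInner_eq (data : List (List Bool)) (n x y xx : Int)
    (l : List Int) : ∀ c : Int,
    pvA_testInner data n x y xx l c =
      if (l.map (pvInd data x y xx)).sum = 0 ∨ c + (l.map (pvInd data x y xx)).sum < n
      then some (c + (l.map (pvInd data x y xx)).sum) else none := by
  induction l with
  | nil => intro c; simp [pvA_testInner]
  | cons yy t ih =>
    intro c
    simp only [pvA_testInner, List.map_cons, List.sum_cons]
    have hT : 0 ≤ (t.map (pvInd data x y xx)).sum := pvSum_ind_nonneg data x y xx t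
    by_cases hb : (pvA_cell data xx yy && !(xx == x && yy == y)) = true
    · have hind : pvInd data x y xx yy = 1 := by unfold pvInd; rw [if_pos hb]
      rw [if_pos hb, hind]
      by_cases hcn : c + 1 ≥ n
      · rw [if_pos hcn, if_neg (by omega)]
      · rw [if_neg hcn, ih (c + 1)]
        have hiff : ((t.map (pvInd data x y xx)).sum = 0 ∨ c + 1 + (t.map (pvInd data x y xx)).sum < n)
            ↔ (1 + (t.map (pvInd data x y xx)).sum = 0 ∨ c + (1 + (t.map (pvInd data x y xx)).sum) < n) := by
          omega
        by_cases hc2 : (t.map (pvInd data x y xx)).sum = 0 ∨ c + 1 + (t.map (pvInd data x y xx)).sum < n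
        · rw [if_pos hc2, if_pos (hiff.1 hc2)]
          congr 1
          ring
        · rw [if_neg hc2, if_neg (fun h => hc2 (hiff.2 h))]
    · have hind : pvInd data x y xx yy = 0 := by unfold pvInd; rw [if_neg hb]
      rw [if_neg hb, hind, ih c]
      norm_num

theorem pvA_testOuter_eq (data : List (List Bool)) (k n h x y : Int)
    (l : List Int) : ∀ c : Int,
    pvA_testOuter data k n h x y l c =
      if (l.map (pvRowCnt data k h x y)).sum = 0 ∨ c + (l.map (pvRowCnt data k h x y)).sum < n
      then some (c + (l.map (pvRowCnt data k h x y)).sum) else none := by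
  induction l with
  | nil => intro c; simp [pvA_testOuter]
  | cons xx t ih =>
    intro c
    simp only [pvA_testOuter, List.map_cons, List.sum_cons]
    rw [pvA_testInner_eq data n x y xx _ c]
    have hrw : ((PySem.List.pyRange (max 0 (y - k)) (min h (y + k + 1)) 1).map (pvInd data x y xx)).sum
        = pvRowCnt data k h x y xx := rfl
    rw [hrw]
    have hR : 0 ≤ pvRowCnt data k h x y xx := pvRowCnt_nonneg data k h x y xx
    have hT : 0 ≤ (t.map (pvRowCnt data k h x y)).sum := by
      apply List.sum_nonneg; intro a ha
      rcases List.mem_map.1 ha with ⟨b, _, rfl⟩; exact pvRowCnt_nonneg _ _ _ _ _ _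
    by_cases hcr : pvRowCnt data k h x y xx = 0 ∨ c + pvRowCnt data k h x y xx < n
    · rw [if_pos hcr]
      show pvA_testOuter data k n h x y t (c + pvRowCnt data k h x y xx) = _
      rw [ih _]
      have hiff : ((t.map (pvRowCnt data k h x y)).sum = 0 ∨
            c + pvRowCnt data k h x y xx + (t.map (pvRowCnt data k h x y)).sum < n)
          ↔ (pvRowCnt data k h x y xx + (t.map (pvRowCnt data k h x y)).sum = 0 ∨
            c + (pvRowCnt data k h x y xx + (t.map (pvRowCnt data k h x y)).sum) < n) := by
        omega
      by_cases hc2 : (t.map (pvRowCnt data k h x y)).sum = 0 ∨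
          c + pvRowCnt data k h x y xx + (t.map (pvRowCnt data k h x y)).sum < n
      · rw [if_pos hc2, if_pos (hiff.1 hc2)]
        congr 1
        ring
      · rw [if_neg hc2, if_neg (fun hcon => hc2 (hiff.2 hcon))]
    · rw [if_neg hcr]
      show (none : Option Int) = _
      rw [if_neg (by omega)]

theorem pvA_test_eq (data : List (List Bool)) (k n w h x y : Int) :
    pvA_test data k n w h x y
      = decide (pvCnt data k w h x y = 0 ∨ pvCnt data k w h x y < n) := by
  unfold pvA_test pvCnt
  rw [pvA_testOuter_eq data k n h x y _ 0]
  by_cases hc : ((PySem.List.pyRange (max 0 (x - k)) (min w (x + k + 1)) 1).map (pvRowCnt data k h x y)).sum = 0 ∨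
      (0 : Int) + ((PySem.List.pyRange (max 0 (x - k)) (min w (x + k + 1)) 1).map (pvRowCnt data k h x y)).sum < n
  · rw [if_pos hc]; simp; omega
  · rw [if_neg hc]; simp; omega

theorem pvSum_point (x c : Int) : ∀ (a b : Int),
    ((PySem.List.pyRange a b 1).map (fun t => if t = x then c else 0)).sum
      = if a ≤ x ∧ x < b then c else 0 := by
  intro a b
  by_cases hab : a < b
  · have hn : 0 ≤ b - a := by omega
    obtain ⟨m, hm⟩ : ∃ m : Nat, b = a + m := ⟨(b - a).toNat, by omega⟩
    subst hm
    clear hab hn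
    induction m with
    | zero =>
      rw [PySem.List.pyRange_one_eq_nil (by omega : a + ((0:Nat):Int) ≤ a)]
      have hno : ¬(a ≤ x ∧ x < a + ((0:Nat):Int)) := by omega
      rw [if_neg hno]
      simp
    | succ m ih =>
      have : (a : Int) + (m + 1 : Nat) = (a + m) + 1 := by push_cast; ring
      rw [this, PySem.List.pyRange_one_succ_right (by omega), List.map_append, List.sum_append, ih]
      simp only [List.map_cons, List.map_nil, List.sum_cons, List.sum_nil]
      push_cast
      split_ifs <;> omega
  · rw [PySem.List.pyRange_one_eq_nil (by omega)]; simp; omega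

-- the prefix row is the table of pvP values
theorem pvB_prefRow_eq (data : List (List Bool)) (x : Int) : ∀ (m : Nat),
    ((PySem.List.pyRange 0 (m : Int) 1).foldl
      (fun acc y =>
        acc ++ [PySem.List.pyGetD acc (-1) 0 +
                (if PySem.List.pyGetD (PySem.List.pyGetD data x []) y false then (1 : Int) else 0)]) [0])
    = (List.range (m + 1)).map (fun (j : Nat) => pvP data x (j : Int)) := by
  intro m
  induction m with
  | zero =>
    rw [PySem.List.pyRange_one_eq_nil (by omega : ((0:Nat):Int) ≤ 0)]
    have hP : pvP data x ((0:Nat) : Int) = 0 := by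
      unfold pvP
      rw [PySem.List.pyRange_one_eq_nil (by omega)]
      simp
    simp [List.range_succ]
    simpa using hP.symm
  | succ m ih =>
    have hcast : ((m + 1 : Nat) : Int) = (m : Int) + 1 := by push_cast; ring
    rw [hcast, PySem.List.pyRange_one_succ_right (by omega), List.foldl_append, ih]
    simp only [List.foldl_cons, List.foldl_nil]
    rw [List.range_succ (n := m + 1), List.map_append]
    congr 1
    have hsplit : (List.range (m + 1)).map (fun (j : Nat) => pvP data x (j : Int))
        = (List.range m).map (fun (j : Nat) => pvP data x (j : Int)) ++ [pvP data x (m : Int)] := by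
      rw [List.range_succ, List.map_append]
      simp
    rw [hsplit, PySem.List.pyGetD_neg_one_append_singleton]
    have hstep : pvP data x ((m : Int) + 1) = pvP data x (m : Int) +
        (if PySem.List.pyGetD (PySem.List.pyGetD data x []) (m : Int) false then (1 : Int) else 0) := by
      unfold pvP pvA_cell
      rw [PySem.List.pyRange_one_succ_right (by omega : (0:Int) ≤ (m : Int)), List.map_append, List.sum_append]
      simp
    have hc2 : ((m + 1 : Nat) : Int) = (m : Int) + 1 := by push_cast; ring
    simp only [List.map_cons, List.map_nil, hc2, hstep]

-- looking up the prefix row at 0 ≤ j ≤ h gives pvP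
theorem pvB_prefRow_get (data : List (List Bool)) (x j : Int)
    (hj0 : 0 ≤ j) (hjh : j ≤ (data.length : Int)) :
    PySem.List.pyGetD (pvB_prefRow data (data.length : Int) x) j 0 = pvP data x j := by
  show PySem.List.pyGetD
      ((PySem.List.pyRange 0 (data.length : Int) 1).foldl
        (fun acc y =>
          acc ++ [PySem.List.pyGetD acc (-1) 0 +
                  (if PySem.List.pyGetD (PySem.List.pyGetD data x []) y false then (1 : Int) else 0)]) [0]) j 0
    = pvP data x j
  rw [pvB_prefRow_eq data x data.length]
  have hjn : j = ((j.toNat : Nat) : Int) := by omega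
  rw [hjn, PySem.List.pyGetD_natCast]
  have hlt : j.toNat < data.length + 1 := by omega
  rw [List.getD_eq_getElem?_getD, List.getElem?_map, List.getElem?_range hlt]
  simp

-- the window sum over columns [y0, y1) as a difference of prefix values
theorem pvWindow_eq (data : List (List Bool)) (x a b : Int) (h0 : 0 ≤ a) (hab : a ≤ b) :
    pvP data x b - pvP data x a =
      ((PySem.List.pyRange a b 1).map (fun yy => if pvA_cell data x yy then (1 : Int) else 0)).sum := by
  unfold pvP
  rw [PySem.List.pyRange_one_append 0 a b h0 hab, List.map_append, List.sum_append]
  ring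

-- ===== main per-cell count equality =====
theorem pvSum_map_add {α : Type} (l : List α) (f g : α → Int) :
    (l.map (fun a => f a + g a)).sum = (l.map f).sum + (l.map g).sum := by
  induction l with
  | nil => simp
  | cons a t ih => simp [ih]; ring

theorem pvInd_split (data : List (List Bool)) (x y : Int)
    (hcell : pvA_cell data x y = true) (xx yy : Int) :
    (if pvA_cell data xx yy then (1 : Int) else 0)
      = pvInd data x y xx yy + (if xx = x ∧ yy = y then 1 else 0) := by
  unfold pvInd
  by_cases h1 : xx = x <;> by_cases h2 : yy = y <;>
    simp [h1, h2, hcell] <;> split <;> simp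

theorem pvB_count_eq (data : List (List Bool)) (k x y : Int)
    (hx0 : 0 ≤ x) (hxw : x < ((data.headD []).length : Int))
    (hy0 : 0 ≤ y) (hyh : y < (data.length : Int))
    (hcell : pvA_cell data x y = true) :
    ((PySem.List.pyRange (max 0 (x - k)) (min ((data.headD []).length : Int) (x + k + 1)) 1).foldl
      (fun s xx =>
        s + (PySem.List.pyGetD (PySem.List.pyGetD
               ((PySem.List.pyRange 0 ((data.headD []).length : Int) 1).map
                 (fun x' => pvB_prefRow data (data.length : Int) x')) xx [])
               (min (data.length : Int) (y + k + 1)) 0 -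
             PySem.List.pyGetD (PySem.List.pyGetD
               ((PySem.List.pyRange 0 ((data.headD []).length : Int) 1).map
                 (fun x' => pvB_prefRow data (data.length : Int) x')) xx [])
               (max 0 (y - k)) 0)) 0) - (if k ≥ 0 then 1 else 0)
    = pvCnt data k ((data.headD []).length : Int) (data.length : Int) x y := by
  by_cases hk : 0 ≤ k
  · have hy0b : (0 : Int) ≤ max 0 (y - k) := by omega
    have hy1b : min ((data.length : Int)) (y + k + 1) ≤ (data.length : Int) := by omega
    have hy0le : max 0 (y - k) ≤ min ((data.length : Int)) (y + k + 1) := by omega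
    rw [PySem.List.foldl_add]
    have hmap1 :
        (PySem.List.pyRange (max 0 (x - k)) (min ((data.headD []).length : Int) (x + k + 1)) 1).map
          (fun xx =>
            PySem.List.pyGetD (PySem.List.pyGetD
               ((PySem.List.pyRange 0 ((data.headD []).length : Int) 1).map
                 (fun x' => pvB_prefRow data (data.length : Int) x')) xx [])
               (min (data.length : Int) (y + k + 1)) 0 -
            PySem.List.pyGetD (PySem.List.pyGetD
               ((PySem.List.pyRange 0 ((data.headD []).length : Int) 1).map
                 (fun x' => pvB_prefRow data (data.length : Int) x')) xx [])
               (max 0 (y - k)) 0)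
        = (PySem.List.pyRange (max 0 (x - k)) (min ((data.headD []).length : Int) (x + k + 1)) 1).map
          (fun xx => pvRowCnt data k (data.length : Int) x y xx + (if xx = x then 1 else 0)) := by
      apply List.map_congr_left
      intro xx hxx
      have hm := (PySem.List.mem_pyRange_one).1 hxx
      have hxx0 : 0 ≤ xx := by omega
      have hxxw : xx < ((data.headD []).length : Int) := by omega
      rw [PySem.List.pyGetD_map_pyRange_of_nonneg _ _ _ _ hxx0 hxxw]
      rw [pvB_prefRow_get data xx _ (by omega) hy1b,
          pvB_prefRow_get data xx _ hy0b (by omega)]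
      rw [pvWindow_eq data xx _ _ hy0b hy0le]
      have hmap2 :
          (PySem.List.pyRange (max 0 (y - k)) (min ((data.length : Int)) (y + k + 1)) 1).map
            (fun yy => if pvA_cell data xx yy then (1 : Int) else 0)
          = (PySem.List.pyRange (max 0 (y - k)) (min ((data.length : Int)) (y + k + 1)) 1).map
            (fun yy => pvInd data x y xx yy + (if yy = y then (if xx = x then (1:Int) else 0) else 0)) := by
        apply List.map_congr_left
        intro yy _
        rw [pvInd_split data x y hcell xx yy]
        by_cases h1 : xx = x <;> by_cases h2 : yy = y <;> simp [h1, h2]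
      rw [hmap2, pvSum_map_add, pvSum_point]
      have : (max 0 (y - k) ≤ y ∧ y < min ((data.length : Int)) (y + k + 1)) := by
        constructor <;> omega
      rw [if_pos this]
      rfl
    rw [hmap1, pvSum_map_add, pvSum_point]
    have hxin : (max 0 (x - k) ≤ x ∧ x < min ((data.headD []).length : Int) (x + k + 1)) := by
      constructor <;> omega
    rw [if_pos hxin, if_pos hk]
    unfold pvCnt
    ring
  · have hx10 : min ((data.headD []).length : Int) (x + k + 1) ≤ max 0 (x - k) := by omega
    rw [PySem.List.pyRange_one_eq_nil hx10]
    unfold pvCnt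
    rw [PySem.List.pyRange_one_eq_nil (by omega : min ((data.headD []).length : Int) (x + k + 1) ≤ max 0 (x - k))]
    simp [hk]

theorem pvFoldl_const {α β : Type} (l : List α) : ∀ acc : β, l.foldl (fun acc _ => acc) acc = acc := by
  induction l with
  | nil => intro acc; rfl
  | cons a t ih => intro acc; exact ih acc

theorem pvSum_eq_zero_iff {α : Type} (l : List α) (f : α → Int) (h : ∀ a ∈ l, 0 ≤ f a) :
    (l.map f).sum = 0 ↔ ∀ a ∈ l, f a = 0 := by
  induction l with
  | nil => simp
  | cons a t ih =>
    simp only [List.map_cons, List.sum_cons, List.mem_cons]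
    have ha := h a (by simp)
    have ht : ∀ b ∈ t, 0 ≤ f b := fun b hb => h b (by simp [hb])
    have hts : 0 ≤ (t.map f).sum := by
      apply List.sum_nonneg; intro v hv
      rcases List.mem_map.1 hv with ⟨b, hb, rfl⟩; exact ht b hb
    constructor
    · intro hz b hmem
      rcases hmem with rfl | hmem
      · omega
      · exact (ih ht).1 (by omega) b hmem
    · intro hall
      have h1 : f a = 0 := hall a (Or.inl rfl)
      have h2 : (t.map f).sum = 0 := (ih ht).2 (fun b hb => hall b (Or.inr hb))
      omega

theorem pvCnt_nonneg (data : List (List Bool)) (k w h x y : Int) : 0 ≤ pvCnt data k w h x y := by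
  apply List.sum_nonneg; intro v hv
  rcases List.mem_map.1 hv with ⟨b, _, rfl⟩; exact pvRowCnt_nonneg _ _ _ _ _ _

theorem pvCnt_zero_iff (data : List (List Bool)) (k w h x y : Int) :
    pvCnt data k w h x y = 0 ↔
      ∀ xx yy : Int, max 0 (x - k) ≤ xx → xx < min w (x + k + 1) →
        max 0 (y - k) ≤ yy → yy < min h (y + k + 1) → pvInd data x y xx yy = 0 := by
  unfold pvCnt
  rw [pvSum_eq_zero_iff _ _ (fun a _ => pvRowCnt_nonneg data k h x y a)]
  constructor
  · intro H xx yy h1 h2 h3 h4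
    have hr := H xx (PySem.List.mem_pyRange_one.2 ⟨h1, h2⟩)
    unfold pvRowCnt at hr
    rw [pvSum_eq_zero_iff _ _ (fun a _ => pvInd_nonneg data x y xx a)] at hr
    exact hr yy (PySem.List.mem_pyRange_one.2 ⟨h3, h4⟩)
  · intro H xx hxx
    unfold pvRowCnt
    rw [pvSum_eq_zero_iff _ _ (fun a _ => pvInd_nonneg data x y xx a)]
    intro yy hyy
    obtain ⟨h1, h2⟩ := PySem.List.mem_pyRange_one.1 hxx
    obtain ⟨h3, h4⟩ := PySem.List.mem_pyRange_one.1 hyy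
    exact H xx yy h1 h2 h3 h4

theorem pvInd_self (data : List (List Bool)) (x y : Int) : pvInd data x y x y = 0 := by
  unfold pvInd; simp

theorem pvInd_zero_iff_of_ne (data : List (List Bool)) (x y xx yy : Int)
    (hne : ¬(xx = x ∧ yy = y)) :
    pvInd data x y xx yy = 0 ↔ pvA_cell data xx yy = false := by
  unfold pvInd
  have hb : (!(xx == x && yy == y)) = true := by
    simp only [Bool.not_eq_true', Bool.and_eq_false_iff, beq_eq_false_iff_ne, ne_eq]
    by_cases h1 : xx = x
    · exact Or.inr (fun h2 => hne ⟨h1, h2⟩)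
    · exact Or.inl h1
  rw [hb]
  cases hcell : pvA_cell data xx yy <;> simp

theorem pvD_cell_cast (data : List (List Bool)) (a b : Nat) :
    pvA_cell data (a : Int) (b : Int) = pvD_cell data a b := by
  unfold pvA_cell pvD_cell
  rw [PySem.List.pyGetD_natCast, PySem.List.pyGetD_natCast]

-- pvCnt = 0 at (x, y) is exactly isolation of (x.toNat, y.toNat) in D_'s sense
theorem pvCnt_zero_iff_isolated (data : List (List Bool)) (k x y : Int)
    (hx0 : 0 ≤ x) (hxw : x < ((data.headD []).length : Int))
    (hy0 : 0 ≤ y) (hyh : y < (data.length : Int))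
    (hc : pvA_cell data x y = true) :
    pvCnt data k ((data.headD []).length : Int) (data.length : Int) x y = 0 ↔
      pvD_isolated data k x.toNat y.toNat := by
  have hxe : ((x.toNat : Nat) : Int) = x := by omega
  have hye : ((y.toNat : Nat) : Int) = y := by omega
  rw [pvCnt_zero_iff]
  constructor
  · intro H
    constructor
    · rw [← pvD_cell_cast, hxe, hye]; exact hc
    · intro xx hxx yy hyy ⟨c1, c2, c3, c4, c5⟩
      have hxxw := List.mem_range.1 hxx
      have hyyh := List.mem_range.1 hyy
      have hne : ¬((xx : Int) = x ∧ (yy : Int) = y) := by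
        intro ⟨e1, e2⟩; exact c5 ⟨by omega, by omega⟩
      have hind := H (xx : Int) (yy : Int) (by omega) (by omega) (by omega) (by omega)
      rw [← pvD_cell_cast]
      exact (pvInd_zero_iff_of_ne data x y _ _ hne).1 hind
  · intro ⟨_, Hiso⟩ xx yy h1 h2 h3 h4
    by_cases hxy : xx = x ∧ yy = y
    · obtain ⟨rfl, rfl⟩ := hxy; exact pvInd_self data xx yy
    · have hxx0 : 0 ≤ xx := by omega
      have hyy0 : 0 ≤ yy := by omega
      have hmx : xx.toNat ∈ List.range (data.headD []).length := List.mem_range.2 (by omega)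
      have hmy : yy.toNat ∈ List.range data.length := List.mem_range.2 (by omega)
      have hiso := Hiso xx.toNat hmx yy.toNat hmy
        ⟨by omega, by omega, by omega, by omega, by
          intro ⟨e1, e2⟩; exact hxy ⟨by omega, by omega⟩⟩
      apply (pvInd_zero_iff_of_ne data x y xx yy hxy).2
      have e1 : ((xx.toNat : Nat) : Int) = xx := by omega
      have e2 : ((yy.toNat : Nat) : Int) = yy := by omega
      rw [← e1, ← e2, pvD_cell_cast]
      exact hiso

theorem pvFoldl_append_abs {α β : Type} (l : List α) (g : α → List β) :
    ∀ acc : List β, l.foldl (fun acc x => acc ++ g x) acc = acc ++ l.flatMap g := by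
  induction l with
  | nil => intro acc; simp
  | cons a t ih => intro acc; simp [ih, List.append_assoc]

theorem pvFoldl_append_if' {α β : Type} (l : List α) (p : α → Bool) (f : α → β) :
    ∀ acc : List β,
      l.foldl (fun acc x => if p x then acc ++ [f x] else acc) acc = acc ++ (l.filter p).map f := by
  induction l with
  | nil => intro acc; simp
  | cons a t ih =>
    intro acc
    by_cases hp : p a = true <;> simp [hp, ih, List.filter_cons]

theorem find_accessible_rolls_spec : Claim_unchanged_find_accessible_rolls := by
  intro data k n _ _ hnd
  show find_accessible_rolls data k n = find_accessible_rolls_alt data k n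
  simp only [find_accessible_rolls, find_accessible_rolls_alt]
  apply PySem.List.foldl_congr_mem
  intro acc x hx
  apply PySem.List.foldl_congr_mem
  intro acc' y hy
  have hxm := (PySem.List.mem_pyRange_one).1 hx
  have hym := (PySem.List.mem_pyRange_one).1 hy
  by_cases hc : pvA_cell data x y = true
  · have hB : pvB_cell data x y = true := hc
    simp only [hc, hB, Bool.true_and, if_true]
    rw [pvA_test_eq data k n ((data.headD []).length : Int) (data.length : Int) x y]
    rw [pvB_count_eq data k x y (by omega) (by omega) (by omega) (by omega) hc]
    have hcond : (pvCnt data k ((data.headD []).length : Int) (data.length : Int) x y = 0 ∨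
        pvCnt data k ((data.headD []).length : Int) (data.length : Int) x y < n) ↔
        pvCnt data k ((data.headD []).length : Int) (data.length : Int) x y < n := by
      constructor
      · rintro (hz | hlt)
        · by_cases hn : 0 < n
          · omega
          · exfalso
            apply hnd
            refine ⟨by omega, x.toNat, List.mem_range.2 (by omega), y.toNat, List.mem_range.2 (by omega), ?_⟩
            exact (pvCnt_zero_iff_isolated data k x y (by omega) (by omega) (by omega) (by omega) hc).1 hz
        · exact hlt
      · exact Or.inr
    by_cases hlt : pvCnt data k ((data.headD []).length : Int) (data.length : Int) x y < n
    · rw [decide_eq_true (hcond.2 hlt), if_pos hlt]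
      simp
    · rw [decide_eq_false (fun hor => hlt (hcond.1 hor)), if_neg hlt]
      simp
  · have hc' : pvA_cell data x y = false := by simpa using hc
    have hB' : pvB_cell data x y = false := hc'
    simp [hc', hB']

theorem find_accessible_rolls_changed : Claim_changed_find_accessible_rolls := by
  unfold Claim_changed_find_accessible_rolls; decide

theorem find_accessible_rolls_tight : Claim_exact_find_accessible_rolls := by
  intro data k n _ _ hd
  obtain ⟨hn0, a, ha, b, hb, hiso⟩ := hd
  have haw := List.mem_range.1 ha
  have hbh := List.mem_range.1 hb
  have hcellA : pvA_cell data (a : Int) (b : Int) = true := by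
    rw [pvD_cell_cast]; exact hiso.1
  -- B returns []
  have hB : find_accessible_rolls_alt data k n = [] := by
    simp only [find_accessible_rolls_alt]
    refine Eq.trans (PySem.List.foldl_congr_mem _ _ (fun acc _ => acc) _ ?_) (pvFoldl_const _ _)
    intro acc x hx
    refine Eq.trans (PySem.List.foldl_congr_mem _ _ (fun acc _ => acc) _ ?_) (pvFoldl_const _ _)
    intro acc' y hy
    have hxm := (PySem.List.mem_pyRange_one).1 hx
    have hym := (PySem.List.mem_pyRange_one).1 hy
    by_cases hc : pvB_cell data x y = true
    · simp only [hc, if_true]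
      rw [pvB_count_eq data k x y (by omega) (by omega) (by omega) (by omega) hc]
      rw [if_neg (by have := pvCnt_nonneg data k ((data.headD []).length : Int) (data.length : Int) x y; omega)]
    · have hc' : pvB_cell data x y = false := by simpa using hc
      simp [hc']
  -- A contains (a, b)
  have hz : pvCnt data k ((data.headD []).length : Int) (data.length : Int) (a : Int) (b : Int) = 0 := by
    apply (pvCnt_zero_iff_isolated data k (a : Int) (b : Int) (by omega) (by omega) (by omega) (by omega) hcellA).2
    have e1 : ((a : Int)).toNat = a := by omega
    have e2 : ((b : Int)).toNat = b := by omega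
    rw [e1, e2]
    exact hiso
  have hmem : ((a : Int), (b : Int)) ∈ find_accessible_rolls data k n := by
    simp only [find_accessible_rolls]
    have hinner : ∀ (acc : List (Int × Int)) (x : Int),
        (PySem.List.pyRange 0 (data.length : Int) 1).foldl
          (fun acc y => if pvA_cell data x y &&
              pvA_test data k n ((data.headD []).length : Int) (data.length : Int) x y
            then acc ++ [(x, y)] else acc) acc
        = acc ++ ((PySem.List.pyRange 0 (data.length : Int) 1).filter
            (fun y => pvA_cell data x y &&
              pvA_test data k n ((data.headD []).length : Int) (data.length : Int) x y)).map
            (fun y => (x, y)) := by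
      intro acc x
      exact pvFoldl_append_if' _ _ _ acc
    simp only [hinner]
    rw [pvFoldl_append_abs]
    simp only [List.nil_append, List.mem_flatMap]
    refine ⟨(a : Int), PySem.List.mem_pyRange_one.2 ⟨by omega, by omega⟩, ?_⟩
    rw [List.mem_map]
    refine ⟨(b : Int), ?_, rfl⟩
    rw [List.mem_filter]
    refine ⟨PySem.List.mem_pyRange_one.2 ⟨by omega, by omega⟩, ?_⟩
    rw [hcellA, pvA_test_eq, decide_eq_true (Or.inl hz)]
    rfl
  intro heq
  rw [heq, hB] at hmem
  simp at hmem
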